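-- pv_equiv track=rewrite | github.com/BertRaeymaekers/scrapbook | random_projects/pedigree_scripts/test.py | pedigree_structure
-- ===== SOURCE A (Python) =====
-- def pedigree_structure(row, depth):
--     """
--     Returns a pedigree drawing skeleton.
--
--     It takes full advantage of the fractal nature of the pedigree drawing structure.
--
--     row: row, where 0 should be the center. It should be inbetween ]2**depth, 2**depth[
--     depth: how deep the pedigree goes.
--     """
--     def inverse(state):
--         """
--         Inversed the upward and downward bends.
--         """
--         for c in state:
--             if c == "\\":
--                 yield "/"
--             elif c == "/":
--                 yield "\\"
--             else:
--                 yield c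
--
--     if row == 0:
--         for i in range(1, depth):
--             yield " "
--         yield "+"
--         return
--     if row > 0:
--         # The main mirror is at row 0.
--         # Positive rows are just the inverse of the negative ones
--         yield from inverse(pedigree_structure(-row, depth))
--         return
--     # The negative rows indexed as if from 1, depends on the depth.
--     row_from_1 = 2**depth + row
--     # Check of the row_from_1 makes sense.
--     if row_from_1 < 0 or row_from_1 > 2**depth:
--         raise ValueError(f"Row {row} doesn't exists for depth {depth}.")
--     # The first row is always a \
--     if row_from_1 == 1:
--         yield "\\"
--         return
--     # The pivot where the mirror is for the row.
--     pivot = 2**(int.bit_length(row_from_1)-1)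
--     if pivot == row_from_1:
--         # Add empties for each zero bit
--         for i in range(2, int.bit_length(row_from_1)):
--             yield " "
--         yield "+"
--         yield "\\"
--         return
--     # The row at the lower side of the mirror.
--     mirror_row = 2*pivot - row_from_1
--     # So we inverse the state of that mirror row (in the original counting)
--     yield from inverse(pedigree_structure(mirror_row - 2**depth, depth))
--     # Add empties for each zero bit
--     for i in range(1, int.bit_length(row_from_1) - int.bit_length(mirror_row)):
--         yield " "
--     # And since we cut of the highest bit by using the mirror row, here we need a |
--     yield "|"
-- ===== SOURCE B (Python) =====
-- def pedigree_structure(row, depth):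
--     """
--     Same pedigree skeleton, built iteratively: walk the mirror chain
--     n -> 2**bit_length(n) - n once, recording the spacer width of each step,
--     and track the bend inversion as a boolean flag instead of re-inverting
--     the recursive output at every level.
--     """
--     if row == 0:
--         yield from " " * (depth - 1)
--         yield "+"
--         return
--     if depth < 0 or abs(row) >= 2 ** depth:
--         raise ValueError(f"Row {row} doesn't exists for depth {depth}.")
--     n = 2 ** depth - abs(row)
--     parity = row > 0
--     widths = []
--     while n != 1 << (n.bit_length() - 1):  # until n is a power of two
--         b = n.bit_length()
--         m = (1 << b) - n
--         widths.append(b - m.bit_length() - 1)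
--         n = m
--         parity = not parity
--     e = n.bit_length() - 1
--     if e >= 1:
--         yield from " " * (e - 1)
--         yield "+"
--     yield "/" if parity else "\\"
--     for w in reversed(widths):
--         yield from " " * w
--         yield "|"
-- ===== Notes on version B (the rewrite author's own statement) =====
-- stated objective: faster
-- what changed: A recurses to the mirrored row and re-inverts the entire recursive output through a nested generator at every level; B walks the mirror chain once with an iterative loop, tracking the inversion as a boolean parity flag and recording only each step's spacer width, so nothing is ever re-traversed.
import Mathlib
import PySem

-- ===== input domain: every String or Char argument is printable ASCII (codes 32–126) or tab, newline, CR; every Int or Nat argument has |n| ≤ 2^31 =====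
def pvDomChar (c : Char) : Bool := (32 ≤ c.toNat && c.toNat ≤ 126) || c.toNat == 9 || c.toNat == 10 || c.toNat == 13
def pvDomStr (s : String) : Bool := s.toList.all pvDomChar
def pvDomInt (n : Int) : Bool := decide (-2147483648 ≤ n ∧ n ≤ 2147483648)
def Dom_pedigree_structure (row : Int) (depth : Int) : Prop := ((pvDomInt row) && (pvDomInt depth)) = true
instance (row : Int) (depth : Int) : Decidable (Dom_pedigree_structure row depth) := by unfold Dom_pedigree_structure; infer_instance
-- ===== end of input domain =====

-- B replaces A's recursion-with-repeated-generator-inversion by one iterative walk of the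
-- mirror chain that tracks the inversion as a boolean parity flag (alternative, measurably faster).


-- ===== PORT A =====

-- Python `int.bit_length` (arguments here are always ≥ 0): bit_length 0 = 0, else ⌊log₂⌋ + 1.
def pyBitLength (i : Int) : Nat := if i = 0 then 0 else Nat.log2 i.natAbs + 1

-- A's inner generator `inverse`: swap "\\" and "/" character-wise.
def pvInverse (xs : List String) : List String :=
  xs.map (fun c => if c = "\\" then "/" else if c = "/" then "\\" else c)

-- A's recursion, made total with a fuel parameter (depth.toNat + 3 always suffices on the
-- admitted inputs, as the proofs below show; the fuel-0 branch is never reached there).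
def pedigreeGo : Nat → Int → Int → List String
  | 0, _, _ => []
  | fuel + 1, row, depth =>
    if row = 0 then
      List.replicate (depth - 1).toNat " " ++ ["+"]      -- `for i in range(1, depth): yield " "` then "+"
    else if 0 < row then
      pvInverse (pedigreeGo fuel (-row) depth)
    else if depth < 0 then []                            -- Python: 2**depth is a float here and the code below raises (TypeError/ValueError)
    else
      let row_from_1 : Int := 2 ^ depth.toNat + row
      if row_from_1 < 0 ∨ 2 ^ depth.toNat < row_from_1 then []   -- raise ValueError
      else if row_from_1 = 1 then ["\\"]
      else if row_from_1 = 0 then []                     -- Python: pivot = 2**(-1) is a float; the recursion then raises TypeError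
      else
        let pivot : Int := 2 ^ (pyBitLength row_from_1 - 1)
        if pivot = row_from_1 then
          List.replicate (pyBitLength row_from_1 - 2) " " ++ ["+", "\\"]
        else
          let mirror : Int := 2 * pivot - row_from_1
          pvInverse (pedigreeGo fuel (mirror - 2 ^ depth.toNat) depth)
            ++ List.replicate (pyBitLength row_from_1 - pyBitLength mirror - 1) " " ++ ["|"]

def pedigree_structure (row : Int) (depth : Int) : List String :=
  pedigreeGo (depth.toNat + 3) row depth

-- ===== PORT B =====

-- B's while-loop, made total with a fuel parameter (Nat.log2 n + 1 always suffices, as the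
-- proofs below show: each chain step strictly decreases Nat.log2 of the argument).
def pvChainGo : Nat → Nat → Bool → List Nat → List Nat × Nat × Bool
  | 0, n, p, ws => (ws, n, p)
  | fuel + 1, n, p, ws =>
    if n = 0 ∨ n = 2 ^ Nat.log2 n then (ws, n, p)       -- loop test `n != 1 << (n.bit_length() - 1)` (n = 0 never occurs)
    else
      pvChainGo fuel (2 ^ (Nat.log2 n + 1) - n) (!p)
        (ws ++ [(Nat.log2 n + 1) - (Nat.log2 (2 ^ (Nat.log2 n + 1) - n) + 1) - 1])

def pedigree_structure_alt (row : Int) (depth : Int) : List String :=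
  if row = 0 then
    List.replicate (depth - 1).toNat " " ++ ["+"]
  else if depth < 0 ∨ (2:Int) ^ depth.toNat ≤ (row.natAbs : Int) then []   -- B raises ValueError
  else
    let n0 : Nat := 2 ^ depth.toNat - row.natAbs
    let res := pvChainGo (Nat.log2 n0 + 1) n0 (decide (0 < row)) []
    (if 1 ≤ Nat.log2 res.2.1 then List.replicate (Nat.log2 res.2.1 - 1) " " ++ ["+"] else [])
      ++ [if res.2.2 then "/" else "\\"]
      ++ res.1.reverse.flatMap (fun w => List.replicate w " " ++ ["|"])

-- ===== PRECONDITION & SPEC =====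
-- Pre_ = exactly the inputs where the Python A returns normally: row 0 (any depth), or
-- 0 ≤ depth with 0 < |row| < 2^depth (stated via log2 so it is checkable for huge depth).
def Pre_pedigree_structure (row : Int) (depth : Int) : Prop :=
  row = 0 ∨ (0 ≤ depth ∧ row ≠ 0 ∧ Nat.log2 row.natAbs < depth.toNat)
instance (row : Int) (depth : Int) : Decidable (Pre_pedigree_structure row depth) := by
  unfold Pre_pedigree_structure; infer_instance

def pvWitness_pedigree_structure : Int × Int := (-3, 3)

def Spec_pedigree_structure (row : Int) (depth : Int) (out : List String) : Prop := out = pedigree_structure_alt row depth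
instance (row : Int) (depth : Int) (out : List String) : Decidable (Spec_pedigree_structure row depth out) := by unfold Spec_pedigree_structure; infer_instance

-- ===== CLAIM (what is proved, stated in full; the proofs are below) =====
def Claim_equal_pedigree_structure : Prop := ∀ (row : Int) (depth : Int), Dom_pedigree_structure row depth → Pre_pedigree_structure row depth → Spec_pedigree_structure row depth (pedigree_structure row depth)

-- ===== LEMMAS AND PROOFS =====

-- One chain step strictly decreases Nat.log2 (so fuel Nat.log2 n + 1 suffices), and decreases n.
theorem pvChain_dec (n : Nat) (h : ¬(n = 0 ∨ n = 2 ^ Nat.log2 n)) :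
    2 ^ (Nat.log2 n + 1) - n < n := by
  have h0 : n ≠ 0 := fun e => h (Or.inl e)
  have hne : n ≠ 2 ^ Nat.log2 n := fun e => h (Or.inr e)
  have h1 := Nat.log2_self_le h0
  have h2 : 2 ^ (Nat.log2 n + 1) = 2 * 2 ^ Nat.log2 n := by ring
  omega

theorem pvChain_log2 (n : Nat) (h : ¬(n = 0 ∨ n = 2 ^ Nat.log2 n)) :
    Nat.log2 (2 ^ (Nat.log2 n + 1) - n) < Nat.log2 n := by
  have h0 : n ≠ 0 := fun e => h (Or.inl e)
  have hne : n ≠ 2 ^ Nat.log2 n := fun e => h (Or.inr e)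
  have h1 := Nat.log2_self_le h0
  have h2 : n < 2 ^ (Nat.log2 n + 1) := Nat.lt_log2_self
  have h3 : 2 ^ (Nat.log2 n + 1) = 2 * 2 ^ Nat.log2 n := by ring
  have hm0 : 2 ^ (Nat.log2 n + 1) - n ≠ 0 := by omega
  exact (Nat.log2_lt hm0).mpr (by omega)

-- Reference shape shared by both ports: the pedigree line for chain value n with inversion parity p.
def pvOut (n : Nat) (p : Bool) : List String :=
  if n = 0 ∨ n = 2 ^ Nat.log2 n then
    (if 1 ≤ Nat.log2 n then List.replicate (Nat.log2 n - 1) " " ++ ["+"] else [])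
      ++ [if p then "/" else "\\"]
  else
    pvOut (2 ^ (Nat.log2 n + 1) - n) (!p)
      ++ List.replicate ((Nat.log2 n + 1) - (Nat.log2 (2 ^ (Nat.log2 n + 1) - n) + 1) - 1) " " ++ ["|"]
termination_by n
decreasing_by exact pvChain_dec _ ‹_›

theorem pvChainGo_acc (fuel : Nat) (n : Nat) (p : Bool) (ws : List Nat) :
    pvChainGo fuel n p ws = (ws ++ (pvChainGo fuel n p []).1, (pvChainGo fuel n p []).2) := by
  induction fuel generalizing n p ws with
  | zero => simp [pvChainGo]
  | succ fuel IH =>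
    by_cases h : n = 0 ∨ n = 2 ^ Nat.log2 n
    · rw [pvChainGo, if_pos h, pvChainGo, if_pos h]; simp
    · rw [pvChainGo, if_neg h]
      conv_rhs => rw [pvChainGo, if_neg h]
      rw [IH]
      simp only [List.nil_append]
      rw [IH _ (!p) [_]]
      simp

-- B's assembly step, factored out for the proofs.
def pvAssemble (res : List Nat × Nat × Bool) : List String :=
  (if 1 ≤ Nat.log2 res.2.1 then List.replicate (Nat.log2 res.2.1 - 1) " " ++ ["+"] else [])
    ++ [if res.2.2 then "/" else "\\"]
    ++ res.1.reverse.flatMap (fun w => List.replicate w " " ++ ["|"])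

theorem pvAssemble_chain (fuel : Nat) (n : Nat) (p : Bool)
    (hf : Nat.log2 n + 1 ≤ fuel) :
    pvAssemble (pvChainGo fuel n p []) = pvOut n p := by
  induction fuel generalizing n p with
  | zero => omega
  | succ fuel IH =>
    by_cases h : n = 0 ∨ n = 2 ^ Nat.log2 n
    · rw [pvChainGo, if_pos h, pvOut, if_pos h]
      simp [pvAssemble]
    · rw [pvOut, if_neg h, pvChainGo, if_neg h, pvChainGo_acc]
      rw [← IH _ (!p) (by have := pvChain_log2 n h; omega)]
      simp [pvAssemble, List.flatMap_append]

theorem pvInverse_append (xs ys : List String) :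
    pvInverse (xs ++ ys) = pvInverse xs ++ pvInverse ys := by
  simp [pvInverse]

theorem pvInverse_pvOut (n : Nat) (p : Bool) :
    pvInverse (pvOut n p) = pvOut n (!p) := by
  induction n using Nat.strong_induction_on generalizing p with
  | _ n IH =>
    by_cases h : n = 0 ∨ n = 2 ^ Nat.log2 n
    · rw [pvOut, if_pos h]
      conv_rhs => rw [pvOut, if_pos h]
      cases p <;> simp [pvInverse] <;> split_ifs <;> simp
    · rw [pvOut, if_neg h]
      conv_rhs => rw [pvOut, if_neg h]
      rw [pvInverse_append, pvInverse_append, IH _ (pvChain_dec n h), Bool.not_not]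
      simp [pvInverse]

theorem pyBitLength_coe (m : Nat) (hm : 1 ≤ m) : pyBitLength (m : Int) = Nat.log2 m + 1 := by
  unfold pyBitLength
  rw [if_neg (by exact_mod_cast Nat.one_le_iff_ne_zero.mp hm)]
  simp

theorem pedigree_neg (depth : Int) (hd : 0 ≤ depth) (fuel : Nat) :
    ∀ n : Nat, 1 ≤ n → n < 2 ^ depth.toNat → Nat.log2 n + 1 ≤ fuel →
      pedigreeGo fuel ((n : Int) - 2 ^ depth.toNat) depth = pvOut n false := by
  induction fuel with
  | zero => intro n _ _ hf; omega
  | succ fuel IH =>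
    intro n h1 h2 hf
    have hcast : ((2 ^ depth.toNat : Nat) : Int) = (2:Int) ^ depth.toNat := by push_cast; ring
    have hnlt : (n : Int) < (2:Int) ^ depth.toNat := by rw [← hcast]; exact_mod_cast h2
    rw [pedigreeGo]
    rw [if_neg (by omega), if_neg (by omega), if_neg (by omega)]
    show (if (2 ^ depth.toNat + ((n:Int) - 2 ^ depth.toNat)) < 0 ∨ 2 ^ depth.toNat < (2 ^ depth.toNat + ((n:Int) - 2 ^ depth.toNat)) then ([]:List String)
      else
        if (2 ^ depth.toNat + ((n:Int) - 2 ^ depth.toNat)) = 1 then ["\\"]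
        else
          if (2 ^ depth.toNat + ((n:Int) - 2 ^ depth.toNat)) = 0 then []
          else
            if (2 ^ (pyBitLength (2 ^ depth.toNat + ((n:Int) - 2 ^ depth.toNat)) - 1) : Int) = (2 ^ depth.toNat + ((n:Int) - 2 ^ depth.toNat)) then
              List.replicate (pyBitLength (2 ^ depth.toNat + ((n:Int) - 2 ^ depth.toNat)) - 2) " " ++ ["+", "\\"]
            else
              pvInverse (pedigreeGo fuel ((2 * (2 ^ (pyBitLength (2 ^ depth.toNat + ((n:Int) - 2 ^ depth.toNat)) - 1) : Int) - (2 ^ depth.toNat + ((n:Int) - 2 ^ depth.toNat))) - 2 ^ depth.toNat) depth) ++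
                  List.replicate (pyBitLength (2 ^ depth.toNat + ((n:Int) - 2 ^ depth.toNat)) - pyBitLength (2 * (2 ^ (pyBitLength (2 ^ depth.toNat + ((n:Int) - 2 ^ depth.toNat)) - 1) : Int) - (2 ^ depth.toNat + ((n:Int) - 2 ^ depth.toNat))) - 1) " " ++
                ["|"]) = pvOut n false
    rw [show (2 ^ depth.toNat + ((n:Int) - 2 ^ depth.toNat)) = (n:Int) from by ring]
    rw [if_neg (by omega), pyBitLength_coe n h1]
    by_cases hn1 : n = 1
    · subst hn1
      rw [if_pos (by norm_num), pvOut, if_pos (by decide)]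
      norm_num [show Nat.log2 1 = 0 from by decide]
    · rw [if_neg (by exact_mod_cast hn1), if_neg (by omega)]
      have hl2 : 2 ≤ n := by omega
      have p1 : 2 ^ Nat.log2 n ≤ n := Nat.log2_self_le (by omega)
      have p2 : n < 2 ^ (Nat.log2 n + 1) := Nat.lt_log2_self
      have hps : (2:Int) ^ (Nat.log2 n + 1 - 1) = ((2 ^ Nat.log2 n : Nat) : Int) := by
        push_cast; ring_nf
      by_cases hpow : n = 2 ^ Nat.log2 n
      · rw [if_pos (by rw [hps]; exact_mod_cast hpow.symm)]
        have hl1 : 1 ≤ Nat.log2 n := by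
          rcases Nat.eq_zero_or_pos (Nat.log2 n) with h | h
          · rw [h] at hpow; simp at hpow; omega
          · omega
        rw [pvOut, if_pos (Or.inr hpow), if_pos hl1]
        simp [show Nat.log2 n + 1 - 2 = Nat.log2 n - 1 from by omega]
      · rw [if_neg (by rw [hps]; exact_mod_cast fun e => hpow (by exact_mod_cast e.symm))]
        have hnot : ¬(n = 0 ∨ n = 2 ^ Nat.log2 n) := by
          rintro (e | e) <;> [omega; exact hpow e]
        set m : Nat := 2 ^ (Nat.log2 n + 1) - n with hm
        have hm1 : 1 ≤ m := by omega
        have hmn : m < n := pvChain_dec n hnot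
        have hlog : Nat.log2 m < Nat.log2 n := pvChain_log2 n hnot
        have hmir : 2 * (2:Int) ^ (Nat.log2 n + 1 - 1) - (n:Int) = ((m:Nat) : Int) := by
          rw [hps, hm]
          push_cast [Nat.cast_sub (le_of_lt p2)]
          ring
        rw [hmir, IH m hm1 (by omega) (by omega), pvInverse_pvOut, pyBitLength_coe m hm1]
        conv_rhs => rw [pvOut]
        rw [if_neg hnot]

-- ===== VERDICT (by name: the statement is the Claim_ definition above) =====
theorem pedigree_structure_spec : Claim_equal_pedigree_structure := by
  intro row depth _ hpre
  unfold Spec_pedigree_structure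
  rcases hpre with h0 | ⟨hd, hne, hlt⟩
  · subst h0
    rw [pedigree_structure, pedigree_structure_alt, pedigreeGo, if_pos rfl, if_pos rfl]
  · have hlt' : row.natAbs < 2 ^ depth.toNat := (Nat.log2_lt (by omega)).mp hlt
    set N : Nat := 2 ^ depth.toNat - row.natAbs with hN
    have hN1 : 1 ≤ N := by omega
    have hN2 : N < 2 ^ depth.toNat := by omega
    have hcast : ((2 ^ depth.toNat : Nat) : Int) = (2:Int) ^ depth.toNat := by push_cast; ring
    have hNc : (N : Int) = (2:Int) ^ depth.toNat - (row.natAbs : Int) := by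
      rw [hN]; push_cast [Nat.cast_sub (le_of_lt hlt')]; ring
    have hNlog : Nat.log2 N < depth.toNat := (Nat.log2_lt (by omega)).mpr hN2
    have hc2 : ¬(depth < 0 ∨ (2:Int) ^ depth.toNat ≤ (row.natAbs : Int)) := by
      rintro (h | h)
      · omega
      · rw [← hcast] at h; have : (2:Nat) ^ depth.toNat ≤ row.natAbs := by exact_mod_cast h
        omega
    rw [pedigree_structure_alt, if_neg hne, if_neg hc2]
    show pedigreeGo (depth.toNat + 3) row depth
        = pvAssemble (pvChainGo (Nat.log2 (2 ^ depth.toNat - row.natAbs) + 1)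
            (2 ^ depth.toNat - row.natAbs) (decide (0 < row)) [])
    rw [pvAssemble_chain _ _ _ (le_refl _), ← hN]
    by_cases hpos : 0 < row
    · rw [show decide (0 < row) = true from by simp [hpos]]
      rw [pedigreeGo, if_neg hne, if_pos hpos]
      rw [show (-row) = (N : Int) - 2 ^ depth.toNat from by omega]
      rw [pedigree_neg depth (by omega) _ N hN1 hN2 (by omega), pvInverse_pvOut, Bool.not_false]
    · rw [show decide (0 < row) = false from by simp [hpos]]
      rw [show row = (N : Int) - 2 ^ depth.toNat from by omega]
      exact pedigree_neg depth (by omega) _ N hN1 hN2 (by omega)
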